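-- pv_equiv track=rewrite | github.com/ahilananantha/Advent-of-Code-2021 | day20.py | enhance_pixel
-- ===== SOURCE A (Python) =====
-- def enhance_pixel(algo, input_image, input_i, input_j, outer_value):
--     pixel_str = []
--     nrows = len(input_image)
--     ncols = len(input_image[0])
--     for i in (input_i - 1, input_i, input_i + 1):
--         for j in (input_j - 1, input_j, input_j + 1):
--             if (0 <= i < nrows) and (0 <= j < ncols):
--                 pixel_str.append(input_image[i][j])
--             else:
--                 pixel_str.append(outer_value)
--     algo_index = 0
--     for i in range(0, len(pixel_str)):
--         if pixel_str[i] == '#':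
--             algo_index |= 0x1 << (len(pixel_str) - 1 - i)
--     return algo[algo_index]
-- ===== SOURCE B (Python) =====
-- def enhance_pixel(algo, input_image, input_i, input_j, outer_value):
--     nrows = len(input_image)
--     ncols = len(input_image[0])
--     ob = 1 if outer_value == '#' else 0
--     # start from the index of an all-outer window, then correct only the
--     # in-bounds cells, taken from the clipped sub-rectangle via slicing
--     idx = 511 * ob
--     i0 = max(input_i - 1, 0)
--     i1 = max(min(input_i + 2, nrows), 0)
--     j0 = max(input_j - 1, 0)
--     j1 = max(min(input_j + 2, ncols), 0)
--     for ri, row in enumerate(input_image[i0:i1], start=i0):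
--         for rj, cell in enumerate(row[j0:j1], start=j0):
--             b = 1 if cell == '#' else 0
--             idx += (b - ob) * 2 ** ((input_i + 1 - ri) * 3 + (input_j + 1 - rj))
--     return algo[idx]
-- ===== Notes on version B (the rewrite author's own statement) =====
-- stated objective: alternative
-- what changed: B replaces A's per-cell bounds-checked 3x3 reads and second bit-shift pass by arithmetic on the clipped window: it starts from the index of an all-outer window (511*ob) and iterates only over the in-bounds sub-rectangle obtained by list slicing (enumerate over input_image[i0:i1] and row[j0:j1]), adding a signed correction (bit-ob)<<pos per cell; no per-cell bounds test and no intermediate pixel list.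
import Mathlib
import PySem

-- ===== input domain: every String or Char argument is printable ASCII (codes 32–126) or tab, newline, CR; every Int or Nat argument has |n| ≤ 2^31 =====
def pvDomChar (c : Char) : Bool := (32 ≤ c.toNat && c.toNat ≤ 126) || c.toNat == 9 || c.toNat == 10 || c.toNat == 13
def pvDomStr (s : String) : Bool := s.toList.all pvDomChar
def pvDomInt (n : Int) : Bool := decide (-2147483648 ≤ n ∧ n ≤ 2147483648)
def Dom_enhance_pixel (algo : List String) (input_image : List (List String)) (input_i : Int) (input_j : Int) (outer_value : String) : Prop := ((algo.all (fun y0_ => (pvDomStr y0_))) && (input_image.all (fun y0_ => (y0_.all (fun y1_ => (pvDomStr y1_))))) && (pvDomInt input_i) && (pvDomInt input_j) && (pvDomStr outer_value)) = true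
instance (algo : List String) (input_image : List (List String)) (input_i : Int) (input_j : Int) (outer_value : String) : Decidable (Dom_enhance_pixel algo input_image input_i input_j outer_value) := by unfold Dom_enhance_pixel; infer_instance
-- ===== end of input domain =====

-- B replaces A's per-cell bounds checks and second bit-shift pass by arithmetic on the clipped
-- window: start from the all-outer index 511*ob and add signed corrections for the cells of the
-- sliced in-bounds sub-rectangle; objective: alternative (same O(1) cost, different mechanism).


-- ===== PORT A =====
-- literal transliteration of A: build pixel_str over the 3x3 neighborhood, then
-- a second pass or-ing shifted bits into algo_index, then algo[algo_index].
def enhance_pixel (algo : List String) (input_image : List (List String)) (input_i : Int) (input_j : Int) (outer_value : String) : String :=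
  let nrows : Int := input_image.length
  -- input_image[0]: raises IndexError on empty image; excluded by Pre_, getD [] unreachable inside Pre_
  let ncols : Int := ((PySem.List.pyGet? input_image 0).getD []).length
  let pixel_str : List String :=
    [input_i - 1, input_i, input_i + 1].foldl (fun acc i =>
      [input_j - 1, input_j, input_j + 1].foldl (fun acc j =>
        if 0 ≤ i ∧ i < nrows ∧ 0 ≤ j ∧ j < ncols then
          -- input_image[i][j]: i in range; the row lookup can raise on a ragged short row (excluded by Pre_)
          acc ++ [(PySem.List.pyGet? ((PySem.List.pyGet? input_image i).getD []) j).getD outer_value]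
        else
          acc ++ [outer_value]) acc) []
  let algo_index : Int :=
    (List.range pixel_str.length).foldl (fun acc i =>
      if pixel_str.getD i "" = "#" then Int.lor acc ((1 : Int) <<< (pixel_str.length - 1 - i)) else acc) 0
  -- algo[algo_index]: raises when algo_index ≥ len(algo); excluded by Pre_
  (PySem.List.pyGet? algo algo_index).getD ""

-- ===== PORT B =====
-- literal transliteration of B: 511*ob base, then enumerate over the two slices,
-- adding (b - ob) * 2 ** bitpos per in-window cell.  The exponent is provably in
-- 0..8 on every enumerated cell, so .toNat is exact where Python's ** is reached.
def enhance_pixel_alt (algo : List String) (input_image : List (List String)) (input_i : Int) (input_j : Int) (outer_value : String) : String :=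
  let nrows : Int := input_image.length
  let ncols : Int := ((PySem.List.pyGet? input_image 0).getD []).length
  let ob : Int := if outer_value = "#" then 1 else 0
  let i0 : Int := max (input_i - 1) 0
  let i1 : Int := max (min (input_i + 2) nrows) 0
  let j0 : Int := max (input_j - 1) 0
  let j1 : Int := max (min (input_j + 2) ncols) 0
  let idx : Int :=
    (PySem.List.enumerate (PySem.List.slice input_image (some i0) (some i1)) i0).foldl
      (fun acc p =>
        (PySem.List.enumerate (PySem.List.slice p.2 (some j0) (some j1)) j0).foldl
          (fun acc q =>
            let b : Int := if q.2 = "#" then 1 else 0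
            acc + (b - ob) * 2 ^ (((input_i + 1 - p.1) * 3 + (input_j + 1 - q.1)).toNat))
          acc)
      (511 * ob)
  (PySem.List.pyGet? algo idx).getD ""

-- ===== PRECONDITION & SPEC =====
-- spec-side description of one neighborhood cell: none exactly where Python's input_image[i][j] raises
def pvCell? (input_image : List (List String)) (outer_value : String) (i j : Int) : Option String :=
  if 0 ≤ i ∧ i < (input_image.length : Int) ∧ 0 ≤ j ∧ j < (((PySem.List.pyGet? input_image 0).getD []).length : Int) then
    PySem.List.pyGet? ((PySem.List.pyGet? input_image i).getD []) j
  else some outer_value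

def pvBit (c : Option String) (outer_value : String) : Int :=
  if c.getD outer_value = "#" then 1 else 0

-- Pre_ holds exactly where the Python A returns normally: the image is nonempty (input_image[0]),
-- every in-bounds neighborhood lookup succeeds (ragged short rows raise IndexError), and the
-- 9-bit index it computes is inside algo (algo[algo_index] raises otherwise).
def Pre_enhance_pixel (algo : List String) (input_image : List (List String)) (input_i : Int) (input_j : Int) (outer_value : String) : Prop :=
  input_image ≠ [] ∧
  (∀ di ∈ [(-1 : Int), 0, 1], ∀ dj ∈ [(-1 : Int), 0, 1],
    (pvCell? input_image outer_value (input_i + di) (input_j + dj)).isSome) ∧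
  256 * pvBit (pvCell? input_image outer_value (input_i - 1) (input_j - 1)) outer_value +
  128 * pvBit (pvCell? input_image outer_value (input_i - 1) input_j) outer_value +
   64 * pvBit (pvCell? input_image outer_value (input_i - 1) (input_j + 1)) outer_value +
   32 * pvBit (pvCell? input_image outer_value input_i (input_j - 1)) outer_value +
   16 * pvBit (pvCell? input_image outer_value input_i input_j) outer_value +
    8 * pvBit (pvCell? input_image outer_value input_i (input_j + 1)) outer_value +
    4 * pvBit (pvCell? input_image outer_value (input_i + 1) (input_j - 1)) outer_value +
    2 * pvBit (pvCell? input_image outer_value (input_i + 1) input_j) outer_value +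
        pvBit (pvCell? input_image outer_value (input_i + 1) (input_j + 1)) outer_value
    < (algo.length : Int)

instance (algo : List String) (input_image : List (List String)) (input_i : Int) (input_j : Int) (outer_value : String) : Decidable (Pre_enhance_pixel algo input_image input_i input_j outer_value) := by unfold Pre_enhance_pixel; infer_instance

def pvWitness_enhance_pixel : List String × List (List String) × Int × Int × String :=
  (["#"], [[".", "."], [".", "."]], 0, 1, ".")

def Spec_enhance_pixel (algo : List String) (input_image : List (List String)) (input_i : Int) (input_j : Int) (outer_value : String) (out : String) : Prop := out = enhance_pixel_alt algo input_image input_i input_j outer_value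
instance (algo : List String) (input_image : List (List String)) (input_i : Int) (input_j : Int) (outer_value : String) (out : String) : Decidable (Spec_enhance_pixel algo input_image input_i input_j outer_value out) := by unfold Spec_enhance_pixel; infer_instance

-- ===== CLAIM (what is proved, stated in full; the proofs are below) =====
def Claim_equal_enhance_pixel : Prop := ∀ (algo : List String) (input_image : List (List String)) (input_i : Int) (input_j : Int) (outer_value : String), Dom_enhance_pixel algo input_image input_i input_j outer_value → Pre_enhance_pixel algo input_image input_i input_j outer_value → Spec_enhance_pixel algo input_image input_i input_j outer_value (enhance_pixel algo input_image input_i input_j outer_value)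

-- ===== LEMMAS AND PROOFS =====

def pvB (s : String) : Int := if s = "#" then 1 else 0

theorem pv_ite_app (c : Prop) [Decidable c] (l : List String) (x y : String) :
    (if c then l ++ [x] else l ++ [y]) = l ++ [if c then x else y] := by split <;> rfl

theorem pv_idx9 (s0 s1 s2 s3 s4 s5 s6 s7 s8 : String) :
    (List.foldl (fun acc i => if [s0,s1,s2,s3,s4,s5,s6,s7,s8].getD i "" = "#" then Int.lor acc ((1:Int) <<< ([s0,s1,s2,s3,s4,s5,s6,s7,s8].length - 1 - i)) else acc) 0
        (List.range [s0,s1,s2,s3,s4,s5,s6,s7,s8].length))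
      = 256 * pvB s0 + 128 * pvB s1 + 64 * pvB s2 + 32 * pvB s3 + 16 * pvB s4 + 8 * pvB s5 + 4 * pvB s6 + 2 * pvB s7 + pvB s8 := by
  rw [show List.range [s0,s1,s2,s3,s4,s5,s6,s7,s8].length = [0,1,2,3,4,5,6,7,8] from rfl]
  simp only [List.foldl, List.getD, List.length_cons, List.length_nil, pvB]
  norm_num
  simp only [← Bool.cond_decide]
  generalize decide (s0 = "#") = b0
  generalize decide (s1 = "#") = b1
  generalize decide (s2 = "#") = b2
  generalize decide (s3 = "#") = b3
  generalize decide (s4 = "#") = b4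
  generalize decide (s5 = "#") = b5
  generalize decide (s6 = "#") = b6
  generalize decide (s7 = "#") = b7
  generalize decide (s8 = "#") = b8
  revert b0 b1 b2 b3 b4 b5 b6 b7 b8
  decide

theorem pv_sum_enum {α : Type} (d : α) (g : Int × α → Int) :
    ∀ (xs : List α) (s : Int),
      ((PySem.List.enumerate xs s).map g).sum
        = ((List.range xs.length).map (fun (t : Nat) => g (s + (t : Int), xs.getD t d))).sum := by
  intro xs
  induction xs with
  | nil => intro s; simp [PySem.List.enumerate_nil]
  | cons x xs ih =>
    intro s
    rw [PySem.List.enumerate_cons, List.length_cons, List.range_succ_eq_map]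
    simp only [List.map_cons, List.sum_cons, List.map_map, ih (s+1)]
    simp only [Function.comp_def, List.getD_cons_succ, List.getD_cons_zero]
    push_cast
    ring_nf

theorem pv_sum_enum_slice {α : Type} (d : α) (g : Int × α → Int) (xs : List α) (a b : Int)
    (ha : 0 ≤ a) (hb : 0 ≤ b) :
    ((PySem.List.enumerate (PySem.List.slice xs (some a) (some b)) a).map g).sum
      = ((PySem.List.pyRange a (max a (min b (xs.length : Int))) 1).map (fun k => g (k, xs.getD k.toNat d))).sum := by
  rw [PySem.List.slice_toNat xs ha hb]
  rw [pv_sum_enum d g]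
  rw [PySem.List.pyRange_one]
  have hL : ((xs.drop a.toNat).take (b.toNat - a.toNat)).length = ((max a (min b (xs.length:Int))) - a).toNat := by
    simp only [List.length_take, List.length_drop]
    omega
  rw [hL, List.map_map]
  congr 1
  apply List.map_congr_left
  intro t ht
  have ht' := List.mem_range.mp ht
  simp only [Function.comp_def]
  have h1 : ((xs.drop a.toNat).take (b.toNat - a.toNat)).getD t d = xs.getD (a.toNat + t) d := by
    simp only [List.getD, List.getElem?_take, List.getElem?_drop]
    have : t < b.toNat - a.toNat := by omega
    simp [this]
  have h2 : (a + (t : Int)).toNat = a.toNat + t := by omega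
  rw [h1, h2]

theorem pv_sum_indicator (a c lo hi : Int) (f : Int → Int) (h : a < c → lo ≤ a ∧ c ≤ hi) :
    ((PySem.List.pyRange a c 1).map f).sum
      = ((PySem.List.pyRange lo hi 1).map (fun l => if a ≤ l ∧ l < c then f l else 0)).sum := by
  by_cases hac : a < c
  · obtain ⟨h1, h2⟩ := h hac
    rw [PySem.List.pyRange_one_append lo a hi h1 (by omega),
        PySem.List.pyRange_one_append a c hi (by omega) h2]
    simp only [List.map_append, List.sum_append]
    have hz1 : ((PySem.List.pyRange lo a 1).map (fun l => if a ≤ l ∧ l < c then f l else 0)).sum = 0 := by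
      apply List.sum_eq_zero; intro x hx
      simp only [List.mem_map] at hx
      obtain ⟨l, hl, rfl⟩ := hx
      rw [PySem.List.mem_pyRange_one] at hl
      rw [if_neg (by omega)]
    have hz2 : ((PySem.List.pyRange c hi 1).map (fun l => if a ≤ l ∧ l < c then f l else 0)).sum = 0 := by
      apply List.sum_eq_zero; intro x hx
      simp only [List.mem_map] at hx
      obtain ⟨l, hl, rfl⟩ := hx
      rw [PySem.List.mem_pyRange_one] at hl
      rw [if_neg (by omega)]
    rw [hz1, hz2]
    have hm : ((PySem.List.pyRange a c 1).map (fun l => if a ≤ l ∧ l < c then f l else 0))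
        = (PySem.List.pyRange a c 1).map f := by
      apply List.map_congr_left
      intro l hl
      rw [PySem.List.mem_pyRange_one] at hl
      rw [if_pos (by omega)]
    rw [hm]; ring
  · rw [PySem.List.pyRange_one_eq_nil (by omega)]
    simp only [List.map_nil, List.sum_nil]
    symm
    apply List.sum_eq_zero; intro x hx
    simp only [List.mem_map] at hx
    obtain ⟨l, hl, rfl⟩ := hx
    rw [if_neg (by omega)]

theorem pv_range3 (x : Int) : PySem.List.pyRange (x-1) (x+2) 1 = [x-1, x, x+1] := by
  rw [PySem.List.pyRange_one_cons (by omega), PySem.List.pyRange_one_cons (by omega),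
      PySem.List.pyRange_one_cons (by omega), PySem.List.pyRange_one_eq_nil (by omega)]
  norm_num

-- distribute a row-level indicator over the three cell terms
theorem pv_ite_add3 (c : Prop) [Decidable c] (x y z : Int) :
    (if c then x + (y + z) else 0) = (if c then x else 0) + ((if c then y else 0) + (if c then z else 0)) := by
  split <;> ring

theorem pv_pyGet_inrange {α : Type} (xs : List α) (k : Int) (d : α) (h0 : 0 ≤ k) (h1 : k < (xs.length : Int)) :
    (PySem.List.pyGet? xs k).getD d = xs.getD k.toNat d := by
  simp only [PySem.List.pyGet?, PySem.List.pyIdx?, List.getD, if_pos h0, if_pos h1, Option.bind_some]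
theorem pv_pyGet_oob {α : Type} (xs : List α) (k : Int) (h : (xs.length : Int) ≤ k) :
    PySem.List.pyGet? xs k = none := by
  simp only [PySem.List.pyGet?, PySem.List.pyIdx?]
  rw [if_pos (by omega), if_neg (by omega)]
  rfl

theorem pv_cell (img : List (List String)) (ov : String) (ii jj k l : Int) (W : Int)
    (hk1 : ii - 1 ≤ k) (hk2 : k ≤ ii + 1) (hl1 : jj - 1 ≤ l) (hl2 : l ≤ jj + 1) :
    (if max (ii - 1) 0 ≤ k ∧ k < max (max (ii - 1) 0) (min (max (min (ii + 2) (img.length : Int)) 0) (img.length : Int)) then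
      (if max (jj - 1) 0 ≤ l ∧ l < max (max (jj - 1) 0) (min (max (min (jj + 2) (((PySem.List.pyGet? img 0).getD []).length : Int)) 0) ((img.getD k.toNat []).length : Int)) then
        ((if (img.getD k.toNat []).getD l.toNat ov = "#" then (1:Int) else 0) - (if ov = "#" then 1 else 0)) * W
      else 0) else 0)
    = ((if (if 0 ≤ k ∧ k < (img.length : Int) ∧ 0 ≤ l ∧ l < (((PySem.List.pyGet? img 0).getD []).length : Int) then (PySem.List.pyGet? ((PySem.List.pyGet? img k).getD []) l).getD ov else ov) = "#" then (1:Int) else 0) - (if ov = "#" then 1 else 0)) * W := by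
  by_cases hA : 0 ≤ k ∧ k < (img.length : Int) ∧ 0 ≤ l ∧ l < (((PySem.List.pyGet? img 0).getD []).length : Int)
  · rw [if_pos hA]
    obtain ⟨hk0, hkN, hl0, hlC⟩ := hA
    rw [if_pos (show max (ii - 1) 0 ≤ k ∧ k < max (max (ii - 1) 0) (min (max (min (ii + 2) (img.length : Int)) 0) (img.length : Int)) by omega)]
    have hrow : (PySem.List.pyGet? img k).getD ([] : List String) = img.getD k.toNat [] :=
      pv_pyGet_inrange img k [] hk0 hkN
    rw [hrow]
    by_cases hlen : l < ((img.getD k.toNat []).length : Int)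
    · rw [if_pos (show _ ∧ _ by constructor <;> omega)]
      rw [pv_pyGet_inrange _ _ _ hl0 hlen]
    · rw [if_neg (by omega), pv_pyGet_oob _ _ (by omega)]
      simp only [Option.getD_none]
      ring_nf
  · rw [if_neg hA]
    have hconds : ¬ (0 ≤ k ∧ k < (img.length : Int)) ∨ ¬ (0 ≤ l ∧ l < (((PySem.List.pyGet? img 0).getD []).length : Int)) := by tauto
    by_cases hR : max (ii - 1) 0 ≤ k ∧ k < max (max (ii - 1) 0) (min (max (min (ii + 2) (img.length : Int)) 0) (img.length : Int))
    · rw [if_pos hR]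
      -- row in range, so the column must be out of bounds; the inner indicator is false
      rw [if_neg (by omega)]
      ring_nf
    · rw [if_neg hR]
      ring_nf

theorem pv_ports_idx (algo : List String) (input_image : List (List String)) (input_i : Int) (input_j : Int) (outer_value : String) :
    enhance_pixel algo input_image input_i input_j outer_value
      = enhance_pixel_alt algo input_image input_i input_j outer_value := by
  simp only [enhance_pixel, enhance_pixel_alt]
  congr 2
  -- A side
  simp only [pv_ite_app]
  simp only [List.foldl, List.nil_append, List.cons_append]
  rw [pv_idx9]
  -- B side
  simp only [PySem.List.foldl_add]
  have hz : (0:Int) ≤ max (input_i - 1) 0 := le_max_right _ _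
  have hz2 : (0:Int) ≤ max (min (input_i + 2) (input_image.length : Int)) 0 := le_max_right _ _
  rw [pv_sum_enum_slice ([] : List String) _ input_image _ _ hz hz2]
  rw [pv_sum_indicator (max (input_i - 1) 0)
        (max (max (input_i - 1) 0) (min (max (min (input_i + 2) (input_image.length : Int)) 0) (input_image.length : Int)))
        (input_i - 1) (input_i + 2) _ (by intro h; constructor <;> omega)]
  rw [pv_range3 input_i]
  simp only [List.map_cons, List.map_nil, List.sum_cons, List.sum_nil, add_zero]
  have hz3 : (0:Int) ≤ max (input_j - 1) 0 := le_max_right _ _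
  have hz4 : (0:Int) ≤ max (min (input_j + 2) (((PySem.List.pyGet? input_image 0).getD []).length : Int)) 0 := le_max_right _ _
  rw [pv_sum_enum_slice outer_value _ (input_image.getD (input_i - 1).toNat []) _ _ hz3 hz4,
      pv_sum_enum_slice outer_value _ (input_image.getD input_i.toNat []) _ _ hz3 hz4,
      pv_sum_enum_slice outer_value _ (input_image.getD (input_i + 1).toNat []) _ _ hz3 hz4]
  rw [pv_sum_indicator (max (input_j - 1) 0)
        (max (max (input_j - 1) 0) (min (max (min (input_j + 2) (((PySem.List.pyGet? input_image 0).getD []).length : Int)) 0) ((input_image.getD (input_i - 1).toNat []).length : Int)))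
        (input_j - 1) (input_j + 2) _ (by intro h; constructor <;> omega)]
  rw [pv_sum_indicator (max (input_j - 1) 0)
        (max (max (input_j - 1) 0) (min (max (min (input_j + 2) (((PySem.List.pyGet? input_image 0).getD []).length : Int)) 0) ((input_image.getD input_i.toNat []).length : Int)))
        (input_j - 1) (input_j + 2) _ (by intro h; constructor <;> omega)]
  rw [pv_sum_indicator (max (input_j - 1) 0)
        (max (max (input_j - 1) 0) (min (max (min (input_j + 2) (((PySem.List.pyGet? input_image 0).getD []).length : Int)) 0) ((input_image.getD (input_i + 1).toNat []).length : Int)))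
        (input_j - 1) (input_j + 2) _ (by intro h; constructor <;> omega)]
  rw [pv_range3 input_j]
  simp only [List.map_cons, List.map_nil, List.sum_cons, List.sum_nil, add_zero]
  simp only [pv_ite_add3]
  have e00 : ((input_i + 1 - (input_i - 1)) * 3 + (input_j + 1 - (input_j - 1))).toNat = 8 := by omega
  have e01 : ((input_i + 1 - (input_i - 1)) * 3 + (input_j + 1 - input_j)).toNat = 7 := by omega
  have e02 : ((input_i + 1 - (input_i - 1)) * 3 + (input_j + 1 - (input_j + 1))).toNat = 6 := by omega
  have e10 : ((input_i + 1 - input_i) * 3 + (input_j + 1 - (input_j - 1))).toNat = 5 := by omega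
  have e11 : ((input_i + 1 - input_i) * 3 + (input_j + 1 - input_j)).toNat = 4 := by omega
  have e12 : ((input_i + 1 - input_i) * 3 + (input_j + 1 - (input_j + 1))).toNat = 3 := by omega
  have e20 : ((input_i + 1 - (input_i + 1)) * 3 + (input_j + 1 - (input_j - 1))).toNat = 2 := by omega
  have e21 : ((input_i + 1 - (input_i + 1)) * 3 + (input_j + 1 - input_j)).toNat = 1 := by omega
  have e22 : ((input_i + 1 - (input_i + 1)) * 3 + (input_j + 1 - (input_j + 1))).toNat = 0 := by omega
  rw [e00, e01, e02, e10, e11, e12, e20, e21, e22]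
  rw [pv_cell input_image outer_value input_i input_j (input_i - 1) (input_j - 1) (2 ^ 8) (by omega) (by omega) (by omega) (by omega)]
  rw [pv_cell input_image outer_value input_i input_j (input_i - 1) input_j (2 ^ 7) (by omega) (by omega) (by omega) (by omega)]
  rw [pv_cell input_image outer_value input_i input_j (input_i - 1) (input_j + 1) (2 ^ 6) (by omega) (by omega) (by omega) (by omega)]
  rw [pv_cell input_image outer_value input_i input_j input_i (input_j - 1) (2 ^ 5) (by omega) (by omega) (by omega) (by omega)]
  rw [pv_cell input_image outer_value input_i input_j input_i input_j (2 ^ 4) (by omega) (by omega) (by omega) (by omega)]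
  rw [pv_cell input_image outer_value input_i input_j input_i (input_j + 1) (2 ^ 3) (by omega) (by omega) (by omega) (by omega)]
  rw [pv_cell input_image outer_value input_i input_j (input_i + 1) (input_j - 1) (2 ^ 2) (by omega) (by omega) (by omega) (by omega)]
  rw [pv_cell input_image outer_value input_i input_j (input_i + 1) input_j (2 ^ 1) (by omega) (by omega) (by omega) (by omega)]
  rw [pv_cell input_image outer_value input_i input_j (input_i + 1) (input_j + 1) (2 ^ 0) (by omega) (by omega) (by omega) (by omega)]
  simp only [pvB]
  ring

theorem pv_witness_ok :
    Dom_enhance_pixel pvWitness_enhance_pixel.1 pvWitness_enhance_pixel.2.1 pvWitness_enhance_pixel.2.2.1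
      pvWitness_enhance_pixel.2.2.2.1 pvWitness_enhance_pixel.2.2.2.2 ∧
    Pre_enhance_pixel pvWitness_enhance_pixel.1 pvWitness_enhance_pixel.2.1 pvWitness_enhance_pixel.2.2.1
      pvWitness_enhance_pixel.2.2.2.1 pvWitness_enhance_pixel.2.2.2.2 := by
  decide

-- ===== VERDICT (by name: the statement is the Claim_ definition above) =====
theorem enhance_pixel_spec : Claim_equal_enhance_pixel := by
  intro algo input_image input_i input_j outer_value _ _
  unfold Spec_enhance_pixel
  exact pv_ports_idx algo input_image input_i input_j outer_value
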